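-- pv_equiv track=rewrite | github.com/krdheeraj51/Problem-Solving-Journal | 2026/January/letterNumber.py | letter_number_separator
-- ===== SOURCE A (Python) =====
-- def letter_number_separator(s):
--     if not s:
--         return s
--
--     result = [s[0]]
--
--     for i in range(1, len(s)):
--         if (s[i].isalpha() and s[i-1].isdigit()) or (s[i].isdigit() and s[i-1].isalpha()):
--             result.append('-')
--         result.append(s[i])
--
--     return ''.join(result)
-- ===== SOURCE B (Python) =====
-- def letter_number_separator(s):
--     if not s:
--         return s
--
--     def cls(ch):
--         if ch.isalpha():
--             return 0
--         if ch.isdigit():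
--             return 1
--         return 2
--
--     # split s into maximal runs of equal class
--     runs = []
--     chars = list(s)
--     while chars:
--         k = cls(chars[0])
--         j = 1
--         while j < len(chars) and cls(chars[j]) == k:
--             j += 1
--         runs.append(chars[:j])
--         chars = chars[j:]
--
--     # join runs, inserting '-' exactly between an alpha run and a digit run
--     pieces = [''.join(runs[0])]
--     for prev, cur in zip(runs, runs[1:]):
--         if {cls(prev[-1]), cls(cur[0])} == {0, 1}:
--             pieces.append('-')
--         pieces.append(''.join(cur))
--     return ''.join(pieces)
-- ===== Notes on version B (the rewrite author's own statement) =====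
-- stated objective: alternative
-- what changed: B splits the string into maximal runs of equal class (alpha/digit/other) and joins the runs with a dash inserted exactly between an alpha run and a digit run, instead of A's per-character scan testing each adjacent pair.
import Mathlib
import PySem

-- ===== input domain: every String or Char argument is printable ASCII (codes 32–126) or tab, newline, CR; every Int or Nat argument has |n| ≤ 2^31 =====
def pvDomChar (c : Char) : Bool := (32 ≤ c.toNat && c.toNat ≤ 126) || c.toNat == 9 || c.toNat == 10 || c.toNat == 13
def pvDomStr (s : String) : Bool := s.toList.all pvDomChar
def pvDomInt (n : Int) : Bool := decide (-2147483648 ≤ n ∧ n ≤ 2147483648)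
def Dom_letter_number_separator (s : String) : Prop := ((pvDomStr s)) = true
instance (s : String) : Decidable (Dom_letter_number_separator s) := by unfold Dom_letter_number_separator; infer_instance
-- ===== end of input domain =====

-- B replaces A's per-character boundary scan by a run-based decomposition (group maximal
-- alpha/digit/other runs, then join with '-' between alpha and digit runs); objective: alternative, same cost.

-- ===== PORT A =====
def lnsBoundary (prev c : Char) : Bool :=
  (PySem.Chars.isalpha c && PySem.Chars.isdigit prev) ||
  (PySem.Chars.isdigit c && PySem.Chars.isalpha prev)

def lnsGo (prev : Char) : List Char → List Char
  | [] => []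
  | c :: cs => (if lnsBoundary prev c then ['-'] else []) ++ c :: lnsGo c cs

def letter_number_separator (s : String) : String :=
  match s.toList with
  | [] => s
  | x :: xs => String.ofList (x :: lnsGo x xs)

-- ===== PORT B =====
-- classifier: 0 = alpha, 1 = digit, 2 = other (same predicates as A's)
def lnsCls (c : Char) : Nat :=
  if PySem.Chars.isalpha c then 0 else if PySem.Chars.isdigit c then 1 else 2

-- maximal runs of equal class (Source B's while loop peeling one run at a time)
def lnsRuns : List Char → List (List Char)
  | [] => []
  | c :: cs =>
    (c :: cs.takeWhile (fun d => lnsCls d == lnsCls c)) ::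
      lnsRuns (cs.dropWhile (fun d => lnsCls d == lnsCls c))
termination_by l => l.length
decreasing_by
  simpa using Nat.lt_succ_of_le (List.length_dropWhile_le _ _)

-- {cls(prev[-1]), cls(cur[0])} == {0, 1} written out as the two orders
def lnsEmitFrom : List Char → List (List Char) → List Char
  | _, [] => []
  | prev, cur :: rs =>
    (if (lnsCls (prev.getLastD ' ') == 0 && lnsCls (cur.headD ' ') == 1) ||
        (lnsCls (prev.getLastD ' ') == 1 && lnsCls (cur.headD ' ') == 0)
     then ['-'] else []) ++ cur ++ lnsEmitFrom cur rs

def lnsJoinRuns : List (List Char) → List Char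
  | [] => []
  | r :: rs => r ++ lnsEmitFrom r rs

def letter_number_separator_alt (s : String) : String :=
  match s.toList with
  | [] => s
  | _ :: _ => String.ofList (lnsJoinRuns (lnsRuns s.toList))

-- ===== PRECONDITION & SPEC =====
def Spec_letter_number_separator (s : String) (out : String) : Prop := out = letter_number_separator_alt s
instance (s : String) (out : String) : Decidable (Spec_letter_number_separator s out) := by unfold Spec_letter_number_separator; infer_instance

-- ===== CLAIM (what is proved, stated in full; the proofs are below) =====
def Claim_equal_letter_number_separator : Prop := ∀ (s : String), Dom_letter_number_separator s → Spec_letter_number_separator s (letter_number_separator s)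

-- ===== LEMMAS AND PROOFS =====

-- ASCII letters and digits are disjoint for PySem's predicates
theorem lns_alpha_digit_disjoint (c : Char) :
    ¬(PySem.Chars.isalpha c = true ∧ PySem.Chars.isdigit c = true) := by
  rintro ⟨h1, h2⟩
  simp only [PySem.Chars.isalpha, PySem.Chars.isdigit, PySem.Chars.isupper, PySem.Chars.islower,
    Bool.or_eq_true, Bool.and_eq_true, decide_eq_true_eq, Char.le_def, UInt32.le_iff_toNat_le,
    show '0'.val.toNat = 48 from rfl, show '9'.val.toNat = 57 from rfl,
    show 'A'.val.toNat = 65 from rfl, show 'Z'.val.toNat = 90 from rfl,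
    show 'a'.val.toNat = 97 from rfl, show 'z'.val.toNat = 122 from rfl] at h1 h2
  rcases h1 with ⟨a, b⟩ | ⟨a, b⟩ <;> omega

-- A's pairwise boundary test equals B's class-pair test
theorem lnsBoundary_eq_cls (a b : Char) :
    lnsBoundary a b =
      ((lnsCls a == 0 && lnsCls b == 1) || (lnsCls a == 1 && lnsCls b == 0)) := by
  have ha := lns_alpha_digit_disjoint a
  have hb := lns_alpha_digit_disjoint b
  unfold lnsBoundary lnsCls
  cases hA : PySem.Chars.isalpha a <;> cases hD : PySem.Chars.isdigit a <;>
    cases hB : PySem.Chars.isalpha b <;> cases hE : PySem.Chars.isdigit b <;>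
      simp_all

-- within a run of equal class A inserts no dash
theorem lnsGo_run (t : List Char) :
    ∀ prev d, (∀ c ∈ t, lnsCls c = lnsCls prev) →
      lnsGo prev (t ++ d) = t ++ lnsGo ((prev :: t).getLastD ' ') d := by
  induction t with
  | nil => intro prev d _; simp [List.getLastD]
  | cons c t ih =>
    intro prev d h
    have hc : lnsCls c = lnsCls prev := h c (by simp)
    have hb : lnsBoundary prev c = false := by
      rw [lnsBoundary_eq_cls, hc]
      rcases Nat.lt_or_ge (lnsCls prev) 1 with h1 | h1 <;> simp <;> omega
    have := ih c d (fun x hx => (h x (by simp [hx])).trans hc.symm)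
    simp only [List.cons_append, lnsGo, hb, if_neg, Bool.false_eq_true, not_false_iff,
      List.nil_append, this]
    simp [List.getLastD]

-- main invariant: A's scan from the first character equals B's run decomposition
theorem lns_main (n : Nat) :
    ∀ (xs : List Char) (x : Char), xs.length ≤ n →
      x :: lnsGo x xs = lnsJoinRuns (lnsRuns (x :: xs)) := by
  induction n with
  | zero =>
    intro xs x h
    have : xs = [] := List.eq_nil_of_length_eq_zero (Nat.le_zero.mp h)
    subst this
    simp [lnsRuns, lnsJoinRuns, lnsEmitFrom, lnsGo]
  | succ n ih =>
    intro xs x h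
    set p := fun d => lnsCls d == lnsCls x with hp
    have hsplit : xs = xs.takeWhile p ++ xs.dropWhile p := (List.takeWhile_append_dropWhile).symm
    have htake : ∀ c ∈ xs.takeWhile p, lnsCls c = lnsCls x := by
      intro c hc
      have := List.mem_takeWhile_imp hc
      simpa [hp] using this
    rw [lnsRuns, ← hp]
    cases hd : xs.dropWhile p with
    | nil =>
      have hx2 : xs = xs.takeWhile p := by conv_lhs => rw [hsplit, hd, List.append_nil]
      have hrun := lnsGo_run (xs.takeWhile p) x [] htake
      simp only [List.append_nil] at hrun
      rw [lnsJoinRuns, lnsRuns, lnsEmitFrom]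
      conv_lhs => rw [congrArg (lnsGo x) hx2]
      rw [hrun]
      simp [lnsGo]
    | cons b bs =>
      have hlen : bs.length ≤ n := by
        have h1 : xs.length = (xs.takeWhile p).length + (b :: bs).length := by
          conv_lhs => rw [hsplit, hd]
          simp
        simp only [List.length_cons] at h1
        omega
      have hbs := ih bs b hlen
      rw [lnsRuns] at hbs
      have hx2 : xs = xs.takeWhile p ++ b :: bs := hsplit.trans (by rw [hd])
      have hrun := lnsGo_run (xs.takeWhile p) x (b :: bs) htake
      have hgo : lnsGo ((x :: xs.takeWhile p).getLastD ' ') (b :: bs) =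
          (if lnsBoundary ((x :: xs.takeWhile p).getLastD ' ') b then ['-'] else []) ++
            b :: lnsGo b bs := by rw [lnsGo]
      rw [lnsJoinRuns, lnsRuns, lnsEmitFrom]
      conv_lhs => rw [congrArg (lnsGo x) hx2]
      rw [hrun, hgo, hbs, lnsJoinRuns, lnsBoundary_eq_cls]
      simp [List.headD, List.getLastD]

-- ===== VERDICT (by name: the statement is the Claim_ definition above) =====
theorem letter_number_separator_spec : Claim_equal_letter_number_separator := by
  intro s _
  unfold Spec_letter_number_separator letter_number_separator letter_number_separator_alt
  cases h : s.toList with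
  | nil => simp
  | cons x xs =>
    exact congrArg String.ofList (lns_main xs.length xs x (le_refl _))
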